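-- pv_equiv track=rewrite | github.com/Bigbirdo07/word-off | legacy_prototype/scripts/build_words.py | has_bad_marker
-- ===== SOURCE A (Python) =====
-- BAD_MARKERS = {
--     "obsolete",
--     "archaic",
--     "dated",
--     "slang",
--     "vulgar",
--     "derogatory",
--     "offensive",
--     "rare",
--     "dialect",
--     "dialectal",
--     "historical",
--     "misspelling",
-- }
--
-- def has_bad_marker(sense: dict) -> bool:
--     markers = []
--     for key in ("tags", "labels", "categories"):
--         markers.extend(sense.get(key, []) or [])
--     for item in markers:
--         if not item:
--             continue
--         lower = str(item).lower()
--         if any(bad in lower for bad in BAD_MARKERS):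
--             return True
--     return False
-- ===== SOURCE B (Python) =====
-- BAD_MARKERS = {
--     "obsolete",
--     "archaic",
--     "dated",
--     "slang",
--     "vulgar",
--     "derogatory",
--     "offensive",
--     "rare",
--     "dialect",
--     "dialectal",
--     "historical",
--     "misspelling",
-- }
--
--
-- def has_bad_marker(sense: dict) -> bool:
--     # Build one combined text of all truthy markers, joined by a newline
--     # (no bad marker contains a newline), then scan it once per bad word.
--     parts = [
--         str(item).lower()
--         for key in ("tags", "labels", "categories")
--         for item in (sense.get(key) or [])
--         if item
--     ]
--     combined = "\n".join(parts)
--     return any(bad in combined for bad in BAD_MARKERS)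
-- ===== Notes on version B (the rewrite author's own statement) =====
-- stated objective: simpler
-- what changed: B replaces A's two-phase build-then-per-item scan loop with a flat comprehension that lowercases the truthy markers, joins them into one newline-separated string, and tests each bad word once against that single combined string.
import Mathlib
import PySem

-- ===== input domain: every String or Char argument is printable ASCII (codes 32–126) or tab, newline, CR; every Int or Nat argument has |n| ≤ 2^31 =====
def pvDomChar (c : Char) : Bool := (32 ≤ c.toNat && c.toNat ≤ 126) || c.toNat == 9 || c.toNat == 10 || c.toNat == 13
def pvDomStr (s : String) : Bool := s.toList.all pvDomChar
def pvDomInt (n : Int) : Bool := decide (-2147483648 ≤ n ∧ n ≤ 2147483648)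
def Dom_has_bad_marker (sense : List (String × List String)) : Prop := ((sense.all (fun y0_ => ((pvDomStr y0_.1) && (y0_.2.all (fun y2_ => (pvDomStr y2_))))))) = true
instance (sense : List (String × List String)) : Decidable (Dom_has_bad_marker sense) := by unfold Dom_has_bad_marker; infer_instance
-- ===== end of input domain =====

-- B builds one newline-joined string of the lowered truthy markers and scans it once per
-- bad word, instead of A's build-a-list-then-test-each-item loop (objective: simpler).

-- BAD_MARKERS (a Python set of string literals; `any` over it is order-independent)
def badMarkers : List String :=
  ["obsolete", "archaic", "dated", "slang", "vulgar", "derogatory",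
   "offensive", "rare", "dialect", "dialectal", "historical", "misspelling"]

-- ===== PORT A =====
-- the `for item in markers: …` loop with its early return
def hbmLoop : List String → Bool
  | [] => false
  | item :: rest =>
    if item = "" then hbmLoop rest          -- `if not item: continue`
    else
      let lower := PySem.Str.lower item     -- str(item).lower() (items are strings)
      if badMarkers.any (fun bad => PySem.Str.isIn bad lower) then true
      else hbmLoop rest

def has_bad_marker (sense : List (String × List String)) : Bool :=
  let markers := ["tags", "labels", "categories"].foldl
    (fun acc key =>
      let v := (PySem.Dict.mk sense).getD key []        -- sense.get(key, [])
      acc ++ (if v = [] then [] else v)) []             -- `v or []`; markers.extend(…)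
  hbmLoop markers

-- ===== PORT B =====
def has_bad_marker_alt (sense : List (String × List String)) : Bool :=
  let parts := ["tags", "labels", "categories"].flatMap
    (fun key =>
      (((PySem.Dict.mk sense).getD key []).filter (fun item => !(item = ""))).map
        PySem.Str.lower)                                 -- the comprehension (get(key) or [])
  let combined := PySem.Str.join "\n" parts              -- "\n".join(parts)
  badMarkers.any (fun bad => PySem.Str.isIn bad combined)

-- ===== PRECONDITION & SPEC =====
def Spec_has_bad_marker (sense : List (String × List String)) (out : Bool) : Prop := out = has_bad_marker_alt sense
instance (sense : List (String × List String)) (out : Bool) : Decidable (Spec_has_bad_marker sense out) := by unfold Spec_has_bad_marker; infer_instance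

-- ===== CLAIM (what is proved, stated in full; the proofs are below) =====
def Claim_equal_has_bad_marker : Prop := ∀ (sense : List (String × List String)), Dom_has_bad_marker sense → Spec_has_bad_marker sense (has_bad_marker sense)

-- ===== LEMMAS AND PROOFS =====

-- a newline-free pattern that is a prefix of c ++ '\n' :: d is a prefix of c
theorem pv_prefix_sep (p : List Char) (hn : '\n' ∉ p) :
    ∀ (c d : List Char), p <+: (c ++ '\n' :: d) → p <+: c := by
  induction p with
  | nil => intro c d _; exact List.nil_prefix
  | cons q p' ih =>
    intro c d h
    cases c with
    | nil =>
      rcases (List.cons_prefix_cons.mp h) with ⟨hq, _⟩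
      exact absurd (hq ▸ List.mem_cons_self) hn
    | cons y c' =>
      rcases (List.cons_prefix_cons.mp h) with ⟨hq, h'⟩
      exact List.cons_prefix_cons.mpr ⟨hq, ih (fun hm => hn (List.mem_cons_of_mem _ hm)) c' d h'⟩

-- a nonempty newline-free pattern is an infix of c ++ '\n' :: d iff it is an infix of a side
theorem pv_infix_sep (p : List Char) (hn : '\n' ∉ p) (hp : p ≠ []) :
    ∀ (c d : List Char), (p <:+: (c ++ '\n' :: d)) ↔ (p <:+: c ∨ p <:+: d) := by
  intro c
  induction c with
  | nil =>
    intro d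
    simp only [List.nil_append]
    rw [List.infix_cons_iff]
    constructor
    · rintro (hpre | hinf)
      · cases p with
        | nil => exact absurd rfl hp
        | cons q p' =>
          rcases (List.cons_prefix_cons.mp hpre) with ⟨hq, _⟩
          exact absurd (hq ▸ List.mem_cons_self) hn
      · exact Or.inr hinf
    · rintro (hc | hd)
      · rcases List.eq_nil_of_infix_nil hc with rfl; exact absurd rfl hp
      · exact Or.inr hd
  | cons x c' ih =>
    intro d
    rw [List.cons_append, List.infix_cons_iff, List.infix_cons_iff, ih d]
    constructor
    · rintro (hpre | hc' | hd)
      · exact Or.inl (Or.inl (pv_prefix_sep p hn (x :: c') d hpre))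
      · exact Or.inl (Or.inr hc')
      · exact Or.inr hd
    · rintro ((hpre | hc') | hd)
      · exact Or.inl (hpre.trans (List.prefix_append _ _))
      · exact Or.inr (Or.inl hc')
      · exact Or.inr (Or.inr hd)

-- a nonempty newline-free pattern is an infix of a '\n'-join iff it is an infix of a part
theorem pv_join_infix (p : List Char) (hn : '\n' ∉ p) (hp : p ≠ []) :
    ∀ (parts : List (List Char)),
      (p <:+: PySem.Chars.join ['\n'] parts) ↔ (∃ cs ∈ parts, p <:+: cs) := by
  intro parts
  induction parts with
  | nil =>
    simp only [PySem.Chars.join_nil]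
    constructor
    · intro h; rcases List.eq_nil_of_infix_nil h with rfl; exact absurd rfl hp
    · rintro ⟨cs, hcs, _⟩; exact absurd hcs (List.not_mem_nil)
  | cons x rest ih =>
    cases rest with
    | nil =>
      simp [PySem.Chars.join_singleton]
    | cons y r =>
      rw [PySem.Chars.join_cons_cons]
      have : x ++ ['\n'] ++ PySem.Chars.join ['\n'] (y :: r)
           = x ++ '\n' :: PySem.Chars.join ['\n'] (y :: r) := by simp
      rw [this, pv_infix_sep p hn hp, ih]
      simp only [List.mem_cons]
      constructor
      · rintro (hx | ⟨cs, hcs, hi⟩)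
        · exact ⟨x, Or.inl rfl, hx⟩
        · exact ⟨cs, Or.inr hcs, hi⟩
      · rintro ⟨cs, (rfl | hcs), hi⟩
        · exact Or.inl hi
        · exact Or.inr ⟨cs, hcs, hi⟩

-- A's loop as an `any`
theorem pv_hbmLoop_eq (ms : List String) :
    hbmLoop ms = ms.any (fun item =>
      !(item = "") && badMarkers.any (fun bad => PySem.Str.isIn bad (PySem.Str.lower item))) := by
  induction ms with
  | nil => rfl
  | cons item rest ih =>
    by_cases h : item = "" <;> simp [hbmLoop, h, ih, List.any_eq]

-- every bad marker is nonempty and newline-free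
theorem pv_bad_ok : ∀ bad ∈ badMarkers, bad.toList ≠ [] ∧ '\n' ∉ bad.toList := by decide

-- core equality, for an arbitrary marker list
theorem pv_core (ms : List String) :
    hbmLoop ms = badMarkers.any (fun bad =>
      PySem.Str.isIn bad (PySem.Str.join "\n" ((ms.filter (fun item => !(item = ""))).map PySem.Str.lower))) := by
  rw [pv_hbmLoop_eq]
  rcases Bool.eq_false_or_eq_true
      (badMarkers.any (fun bad =>
        PySem.Str.isIn bad (PySem.Str.join "\n" ((ms.filter (fun item => !(item = ""))).map PySem.Str.lower)))) with hB | hB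
  all_goals
    rw [hB]
    first
    | rw [List.any_eq_true] at hB ⊢
    | (rw [← Bool.not_eq_true, List.any_eq_true] at hB
       rw [← Bool.not_eq_true, List.any_eq_true])
  · -- B true: some bad word is in the joined string
    rcases hB with ⟨bad, hbadmem, hIn⟩
    rw [PySem.Str.isIn_iff_infix, PySem.Str.toList_join] at hIn
    have hne := (pv_bad_ok bad hbadmem).1
    have hnl := (pv_bad_ok bad hbadmem).2
    have hsep : ("\n" : String).toList = ['\n'] := rfl
    rw [hsep, pv_join_infix bad.toList hnl hne] at hIn
    rcases hIn with ⟨cs, hcsmem, hinf⟩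
    rcases List.mem_map.mp hcsmem with ⟨part, hpartmem, rfl⟩
    rcases List.mem_map.mp hpartmem with ⟨item, hitemmem, rfl⟩
    rcases List.mem_filter.mp hitemmem with ⟨hitem, hne'⟩
    refine ⟨item, hitem, ?_⟩
    simp only [hne', Bool.true_and, List.any_eq_true]
    refine ⟨bad, hbadmem, ?_⟩
    rw [PySem.Str.isIn_iff_infix]
    exact hinf
  · -- B false: no marker can contain a bad word
    intro hA
    apply hB
    rcases hA with ⟨item, hitem, hcond⟩
    rcases Bool.and_eq_true_iff.mp hcond with ⟨hne', hany⟩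
    rcases List.any_eq_true.mp hany with ⟨bad, hbadmem, hIn⟩
    refine ⟨bad, hbadmem, ?_⟩
    rw [PySem.Str.isIn_iff_infix, PySem.Str.toList_join]
    have hsep : ("\n" : String).toList = ['\n'] := rfl
    rw [hsep, pv_join_infix bad.toList (pv_bad_ok bad hbadmem).2 (pv_bad_ok bad hbadmem).1]
    rw [PySem.Str.isIn_iff_infix] at hIn
    refine ⟨(PySem.Str.lower item).toList, ?_, hIn⟩
    exact List.mem_map_of_mem (List.mem_map_of_mem (List.mem_filter.mpr ⟨hitem, hne'⟩))

-- `v or []` is just `v`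
theorem pv_or_nil (v : List String) : (if v = [] then [] else v) = v := by
  split <;> simp_all

-- ===== VERDICT (by name: the statement is the Claim_ definition above) =====
theorem has_bad_marker_spec : Claim_equal_has_bad_marker := by
  intro sense _
  unfold Spec_has_bad_marker has_bad_marker has_bad_marker_alt
  simp only [List.foldl_cons, List.foldl_nil, List.flatMap_cons, List.flatMap_nil,
    pv_or_nil, List.nil_append, List.append_nil]
  rw [pv_core]
  simp [List.filter_append, List.map_append]
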